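-- pv_equiv track=rewrite | github.com/bjornthiberg/advent-of-code-2025 | src/day2.py | part2_val_if_invalid
-- ===== SOURCE A (Python) =====
-- def part2_val_if_invalid(val, unit):
--     s = str(val)
--     repeater = s[0:unit]
--
--     # starts with 0 = invalid ID
--     if repeater[0] == "0":
--         return 0
--
--     if all(s[i : i + unit] == repeater for i in range(0, len(s), unit)):
--         return val
--
--     return 0
-- ===== SOURCE B (Python) =====
-- def part2_val_if_invalid(val, unit):
--     s = str(val)
--
--     # leading 0 = invalid ID; block size must be positive
--     if s[0] == "0" or unit < 1:
--         return 0
--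
--     head = s[:unit]
--     rest = s[unit:]
--     while rest:
--         if rest[:unit] != head:
--             return 0
--         rest = rest[unit:]
--     return val
-- ===== Notes on version B (the rewrite author's own statement) =====
-- stated objective: simpler
-- what changed: The indexed all(s[i:i+unit]==repeater for i in range(0,len(s),unit)) scan is replaced by splitting s into head=s[:unit] and rest=s[unit:] and a while loop that compares and peels one block off the front of rest until it is empty.
-- intended difference: For negative unit with nonzero val (where the prefix slice is still nonempty), A's range(0, len(s), unit) is empty so all() is vacuously true and A returns val; B returns 0, the intended value since a negative block size cannot tile the digit string. — e.g. on part2_val_if_invalid(12, -1): A returns 12, B returns 0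
import Mathlib
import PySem

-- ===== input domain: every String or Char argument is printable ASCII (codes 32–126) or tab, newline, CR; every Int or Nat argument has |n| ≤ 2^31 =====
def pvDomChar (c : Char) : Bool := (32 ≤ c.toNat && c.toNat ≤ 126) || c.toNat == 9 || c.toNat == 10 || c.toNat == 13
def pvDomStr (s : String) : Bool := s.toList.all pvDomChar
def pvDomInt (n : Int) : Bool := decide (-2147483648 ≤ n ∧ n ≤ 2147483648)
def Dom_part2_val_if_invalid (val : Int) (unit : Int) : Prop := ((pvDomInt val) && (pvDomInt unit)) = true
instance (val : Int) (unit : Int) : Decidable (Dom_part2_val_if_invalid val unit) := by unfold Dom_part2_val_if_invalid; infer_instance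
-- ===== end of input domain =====

-- B replaces A's indexed range/slice scan with a guard plus a loop that peels one block
-- off the tail at a time (rest = rest[unit:]); objective: simpler. Equal on Pre_ outside D_.

-- ===== PORT A =====
def part2_val_if_invalid (val : Int) (unit : Int) : Int :=
  let s := PySem.Int.toChars val
  let repeater := PySem.List.slice s (some 0) (some unit)
  match PySem.List.pyGet? repeater 0 with
  | none => 0  -- repeater[0] raises IndexError in Python: excluded by Pre_
  | some c =>
    if c = '0' then 0
    else if (PySem.List.pyRange 0 (s.length : Int) unit).all
        (fun i => PySem.List.slice s (some i) (some (i + unit)) == repeater) then val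
    else 0

-- ===== PORT B =====
-- the while loop: peel one block off the front of rest each iteration.
-- rest = rest[unit:] is (c :: rest').drop u, written rest'.drop (u - 1) (equal for the
-- only reachable case u ≥ 1, past the guard) so the recursion is on a strict sublist.
def pvLoop (head : List Char) (u : Nat) : List Char → Bool
  | [] => true
  | c :: rest => ((c :: rest).take u == head) && pvLoop head u (rest.drop (u - 1))
termination_by xs => xs.length
decreasing_by simp

def part2_val_if_invalid_alt (val : Int) (unit : Int) : Int :=
  let s := PySem.Int.toChars val
  -- s[0] never raises: str(val) is nonempty
  if PySem.List.pyGet? s 0 = some '0' ∨ unit < 1 then 0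
  else
    let head := PySem.List.slice s none (some unit)
    let rest := PySem.List.slice s (some unit) none
    if pvLoop head unit.toNat rest then val else 0

-- ===== PRECONDITION & SPEC =====
-- Pre_ excludes exactly the inputs where Python A raises IndexError at repeater[0]:
-- unit = 0, or unit so negative that the slice s[0:unit] is empty.
def Pre_part2_val_if_invalid (val : Int) (unit : Int) : Prop :=
  1 ≤ unit ∨ (unit ≤ -1 ∧ 1 ≤ ((PySem.Int.toChars val).length : Int) + unit)
instance (val : Int) (unit : Int) : Decidable (Pre_part2_val_if_invalid val unit) := by
  unfold Pre_part2_val_if_invalid; infer_instance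
def pvWitness_part2_val_if_invalid : Int × Int := (1212, 2)

-- For negative unit with nonzero val (prefix slice still nonempty), A's range(0, len(s), unit)
-- is empty so all() is vacuously true and A returns val; B returns 0, the intended value since
-- a negative block size cannot tile the digit string.
def D_part2_val_if_invalid (val : Int) (unit : Int) : Prop := unit ≤ -1 ∧ val ≠ 0
instance (val : Int) (unit : Int) : Decidable (D_part2_val_if_invalid val unit) := by
  unfold D_part2_val_if_invalid; infer_instance

def Spec_part2_val_if_invalid (val : Int) (unit : Int) (out : Int) : Prop :=
  ¬ D_part2_val_if_invalid val unit → out = part2_val_if_invalid_alt val unit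
instance (val : Int) (unit : Int) (out : Int) : Decidable (Spec_part2_val_if_invalid val unit out) := by
  unfold Spec_part2_val_if_invalid; infer_instance

def pvDiffWitness_part2_val_if_invalid : Int × Int := (12, -1)
def pvDiffWitnessOut_part2_val_if_invalid : Int × Int := (12, 0)

-- ===== CLAIM (what is proved, stated in full; the proofs are below) =====
def Claim_unchanged_part2_val_if_invalid : Prop := ∀ (val : Int) (unit : Int), Dom_part2_val_if_invalid val unit → Pre_part2_val_if_invalid val unit → Spec_part2_val_if_invalid val unit (part2_val_if_invalid val unit)
def Claim_changed_part2_val_if_invalid : Prop := Dom_part2_val_if_invalid (pvDiffWitness_part2_val_if_invalid.1) (pvDiffWitness_part2_val_if_invalid.2) ∧ Pre_part2_val_if_invalid (pvDiffWitness_part2_val_if_invalid.1) (pvDiffWitness_part2_val_if_invalid.2) ∧ D_part2_val_if_invalid (pvDiffWitness_part2_val_if_invalid.1) (pvDiffWitness_part2_val_if_invalid.2) ∧ part2_val_if_invalid (pvDiffWitness_part2_val_if_invalid.1) (pvDiffWitness_part2_val_if_invalid.2) = pvDiffWitnessOut_part2_val_if_invalid.1 ∧ part2_val_if_invalid_alt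 (pvDiffWitness_part2_val_if_invalid.1) (pvDiffWitness_part2_val_if_invalid.2) = pvDiffWitnessOut_part2_val_if_invalid.2 ∧ pvDiffWitnessOut_part2_val_if_invalid.1 ≠ pvDiffWitnessOut_part2_val_if_invalid.2
def Claim_exact_part2_val_if_invalid : Prop := ∀ (val : Int) (unit : Int), Dom_part2_val_if_invalid val unit → Pre_part2_val_if_invalid val unit → D_part2_val_if_invalid val unit → part2_val_if_invalid val unit ≠ part2_val_if_invalid_alt val unit

-- ===== LEMMAS AND PROOFS =====

-- ceiling division on ℕ
def pvCdiv (n u : ℕ) : ℕ := (n + u - 1) / u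

lemma pvCdiv_zero (u : ℕ) (hu : 1 ≤ u) : pvCdiv 0 u = 0 := by
  unfold pvCdiv
  exact Nat.div_eq_of_lt (by omega)

lemma pvCdiv_succ (n u : ℕ) (hu : 1 ≤ u) (hn : 1 ≤ n) :
    pvCdiv n u = pvCdiv (n - u) u + 1 := by
  unfold pvCdiv
  rcases Nat.lt_or_ge u n with h | h
  · have : n + u - 1 = (n - u + u - 1) + 1 * u := by omega
    rw [this, Nat.add_mul_div_right _ _ (show 0 < u by omega)]
  · have hz : n - u = 0 := by omega
    rw [hz]
    have h0 : (0 + u - 1) / u = 0 := Nat.div_eq_of_lt (by omega)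
    have h1 : (n + u - 1) / u = 1 :=
      Nat.div_eq_of_lt_le (by omega) (by omega)
    omega

-- B's peeling loop equals the block-indexed scan over the chunks of xs
lemma pvLoop_eq_chunks (u : ℕ) (hu : 1 ≤ u) (head : List Char) :
    ∀ n (xs : List Char), xs.length = n →
    pvLoop head u xs
    = ((List.range (pvCdiv n u)).all (fun k => ((xs.drop (u*k)).take u == head))) := by
  intro n
  induction n using Nat.strong_induction_on with
  | _ n ih =>
    intro xs hxs
    rcases xs with _ | ⟨c, rest⟩
    · have h0 : n = 0 := by simpa using hxs.symm
      subst h0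
      simp [pvLoop, pvCdiv_zero u hu]
    · have hn1 : 1 ≤ n := by simp at hxs; omega
      rw [pvCdiv_succ n u hu hn1, List.range_succ_eq_map]
      have hdrop : rest.drop (u - 1) = (c :: rest).drop u := by
        obtain ⟨u', rfl⟩ : ∃ u', u = u' + 1 := ⟨u - 1, by omega⟩
        simp
      have hdd : ∀ k : ℕ, (((c :: rest).drop (u * Nat.succ k)).take u == head)
          = ((((c :: rest).drop u).drop (u*k)).take u == head) := by
        intro k
        rw [List.drop_drop]
        have : u * Nat.succ k = u + u * k := by rw [Nat.mul_succ]; omega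
        rw [this]
      have ihd := ih (n - u) (by omega) ((c :: rest).drop u)
        (by rw [List.length_drop, hxs])
      calc pvLoop head u (c :: rest)
          = (((c :: rest).take u == head) && pvLoop head u ((c :: rest).drop u)) := by
            rw [pvLoop, hdrop]
        _ = (((c :: rest).take u == head) &&
             ((List.range (pvCdiv (n - u) u)).all
                (fun k => ((((c :: rest).drop u).drop (u*k)).take u == head)))) := by
            rw [ihd]
        _ = ((0 :: List.map Nat.succ (List.range (pvCdiv (n - u) u))).all
              (fun k => (((c :: rest).drop (u*k)).take u == head))) := by
            simp only [List.all_cons, List.all_map, Function.comp_def, hdd,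
              Nat.mul_zero, List.drop_zero]

-- the first chunk of s trivially equals s.take u, so the scan may start at s.drop u
lemma pvLoop_shift (u : ℕ) (hu : 1 ≤ u) (s : List Char) :
    pvLoop (s.take u) u s = pvLoop (s.take u) u (s.drop u) := by
  rcases s with _ | ⟨c, rest⟩
  · simp
  · rw [pvLoop]
    have hdrop : rest.drop (u - 1) = (c :: rest).drop u := by
      obtain ⟨u', rfl⟩ : ∃ u', u = u' + 1 := ⟨u - 1, by omega⟩
      simp
    simp [hdrop]

-- the element count of pyRange 0 len u equals pvCdiv
lemma pvCount_eq (n u : ℕ) (hu : 1 ≤ u) :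
    (if (0:ℤ) < (n:ℤ) then (((n:ℤ) - 0 + (u:ℤ) - 1) / (u:ℤ)).toNat else 0) = pvCdiv n u := by
  rcases Nat.eq_zero_or_pos n with h0 | h1
  · subst h0
    simp [pvCdiv_zero u hu]
  · have hpos : (0:ℤ) < (n:ℤ) := by exact_mod_cast h1
    rw [if_pos hpos]
    have : (n:ℤ) - 0 + (u:ℤ) - 1 = ((n + u - 1 : ℕ) : ℤ) := by omega
    rw [this, ← Int.natCast_div, Int.toNat_natCast]
    rfl

-- A's else-branch condition equals B's loop over rest = s.drop u, for positive unit
lemma pvCond_eq (s : List Char) (u : ℕ) (hu : 1 ≤ u) :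
    ((PySem.List.pyRange 0 (s.length : Int) ((u:ℕ):ℤ)).all
      (fun i => PySem.List.slice s (some i) (some (i + ((u:ℕ):ℤ))) == PySem.List.slice s (some 0) (some ((u:ℕ):ℤ))))
    = pvLoop (s.take u) u (s.drop u) := by
  have hu' : (0:ℤ) < ((u:ℕ):ℤ) := by exact_mod_cast hu
  have hrep : PySem.List.slice s (some 0) (some ((u:ℕ):ℤ)) = s.take u := by
    rw [PySem.List.slice_zero_start, PySem.List.slice_to s (le_of_lt hu'), Int.toNat_natCast]
  have hslice : ∀ k : ℕ,
      PySem.List.slice s (some (0 + ((u:ℕ):ℤ) * (k:ℕ))) (some (0 + ((u:ℕ):ℤ) * (k:ℕ) + ((u:ℕ):ℤ)))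
      = (s.drop (u*k)).take u := by
    intro k
    have h1 : (0:ℤ) + ((u:ℕ):ℤ) * (k:ℕ) = ((u*k : ℕ):ℤ) := by push_cast; ring
    rw [h1, PySem.List.slice_natCast_add]
  rw [PySem.List.pyRange_of_pos 0 (s.length : Int) hu', hrep, List.all_map,
    pvCount_eq s.length u hu]
  calc ((List.range (pvCdiv s.length u)).all
          (fun k => ((fun i => PySem.List.slice s (some i) (some (i + ((u:ℕ):ℤ))) == s.take u)
            (0 + ((u:ℕ):ℤ) * (k:ℕ)))))
      = ((List.range (pvCdiv s.length u)).all (fun k => ((s.drop (u*k)).take u == s.take u))) := by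
        simp only [hslice]
    _ = pvLoop (s.take u) u s := (pvLoop_eq_chunks u hu (s.take u) s.length s rfl).symm
    _ = pvLoop (s.take u) u (s.drop u) := pvLoop_shift u hu s

-- decimal digits of a positive number never start with '0'
lemma pvToDigits_head : ∀ n : ℕ, 1 ≤ n → (Nat.toDigits 10 n)[0]? ≠ some '0' := by
  intro n
  induction n using Nat.strong_induction_on with
  | _ n ih =>
    intro hn
    rw [Nat.toDigits_eq_if (by norm_num)]
    split
    · interval_cases n <;> decide
    · next h =>
      rw [List.getElem?_append_left Nat.length_toDigits_pos]
      exact ih (n / 10) (by omega) (by omega)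

lemma pvToChars_head (val : ℤ) (hv : val ≠ 0) : (PySem.Int.toChars val)[0]? ≠ some '0' := by
  unfold PySem.Int.toChars
  split
  · simp
  · next h => exact pvToDigits_head val.toNat (by omega)

lemma pvToChars_ne_nil (val : ℤ) : PySem.Int.toChars val ≠ [] := by
  unfold PySem.Int.toChars
  split
  · simp
  · exact List.ne_nil_of_length_pos Nat.length_toDigits_pos

-- ===== VERDICT (by name: the statement is the Claim_ definition above) =====
theorem part2_val_if_invalid_spec : Claim_unchanged_part2_val_if_invalid := by
  intro val unit hdom hpre hnd
  rcases hpre with hpos | ⟨hneg, hlen⟩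
  · -- unit ≥ 1: the two conditions agree
    obtain ⟨u, rfl⟩ : ∃ u : ℕ, unit = (u:ℤ) := ⟨unit.toNat, (Int.toNat_of_nonneg (by omega)).symm⟩
    have hu : 1 ≤ u := by exact_mod_cast hpos
    unfold part2_val_if_invalid part2_val_if_invalid_alt
    obtain ⟨c0, t, hs⟩ : ∃ c0 t, PySem.Int.toChars val = c0 :: t := by
      rcases h : PySem.Int.toChars val with _ | ⟨a, l⟩
      · exact absurd h (pvToChars_ne_nil val)
      · exact ⟨a, l, rfl⟩
    have hrep : PySem.List.slice (PySem.Int.toChars val) (some 0) (some ((u:ℕ):ℤ))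
        = (PySem.Int.toChars val).take u := by
      rw [PySem.List.slice_zero_start, PySem.List.slice_to _ (by positivity), Int.toNat_natCast]
    have htake : (PySem.Int.toChars val).take u = c0 :: t.take (u - 1) := by
      obtain ⟨u', rfl⟩ : ∃ u', u = u' + 1 := ⟨u - 1, by omega⟩
      simp [hs]
    have hget : PySem.List.pyGet? (PySem.List.slice (PySem.Int.toChars val) (some 0) (some ((u:ℕ):ℤ))) 0
        = some c0 := by
      rw [hrep, htake, PySem.List.pyGet?_zero_cons]
    have hget0 : PySem.List.pyGet? (PySem.Int.toChars val) 0 = some c0 := by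
      rw [hs, PySem.List.pyGet?_zero_cons]
    simp only [hget, hget0]
    by_cases hc : c0 = '0'
    · simp [hc]
    · have hguard : ¬ (some c0 = some '0' ∨ ((u:ℕ):ℤ) < 1) := by
        push Not
        exact ⟨by simpa using hc, by exact_mod_cast hu⟩
      rw [if_neg hguard, if_neg hc]
      have hhead : PySem.List.slice (PySem.Int.toChars val) none (some ((u:ℕ):ℤ))
          = (PySem.Int.toChars val).take u := by
        rw [PySem.List.slice_to_natCast]
      have hrest : PySem.List.slice (PySem.Int.toChars val) (some ((u:ℕ):ℤ)) none
          = (PySem.Int.toChars val).drop u := by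
        rw [PySem.List.slice_from_natCast]
      rw [pvCond_eq (PySem.Int.toChars val) u hu, hhead, hrest, Int.toNat_natCast]
  · -- unit ≤ -1 inside Pre_ forces val ≠ 0, hence D_ holds: vacuous here
    exfalso
    apply hnd
    refine ⟨hneg, ?_⟩
    rintro rfl
    have h0 : ((PySem.Int.toChars 0).length : ℤ) = 1 := by decide
    omega

theorem part2_val_if_invalid_changed : Claim_changed_part2_val_if_invalid := by
  unfold Claim_changed_part2_val_if_invalid; decide

theorem part2_val_if_invalid_tight : Claim_exact_part2_val_if_invalid := by
  intro val unit hdom hpre hd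
  obtain ⟨hu, hv⟩ := hd
  rcases hpre with hpos | ⟨_, hlen⟩
  · omega
  · obtain ⟨m, rfl⟩ : ∃ m : ℕ, unit = -(m:ℤ) := ⟨(-unit).toNat, by omega⟩
    have hm1 : 1 ≤ m := by omega
    unfold part2_val_if_invalid part2_val_if_invalid_alt
    obtain ⟨s, hs⟩ : ∃ s, PySem.Int.toChars val = s := ⟨_, rfl⟩
    rw [hs] at hlen ⊢
    have hlen' : m + 1 ≤ s.length := by omega
    have hhead : s[0]? ≠ some '0' := by rw [← hs]; exact pvToChars_head val hv
    obtain ⟨c0, rest, rfl⟩ : ∃ c0 rest, s = c0 :: rest := by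
      cases s with
      | nil => simp at hlen'
      | cons a l => exact ⟨a, l, rfl⟩
    have hc0 : c0 ≠ '0' := by intro h; exact hhead (by simp [h])
    have hrep : PySem.List.slice (c0 :: rest) (some 0) (some (-(m:ℤ)))
        = c0 :: rest.take ((c0 :: rest).length - m - 1) := by
      rw [PySem.List.slice_zero_start, PySem.List.slice_to_neg_natCast _ m (by omega)]
      have h1 : (c0 :: rest).length - m = ((c0 :: rest).length - m - 1) + 1 := by omega
      rw [h1, List.take_succ_cons]
      norm_num
    have hrange : PySem.List.pyRange 0 (((c0 :: rest).length : ℕ) : ℤ) (-(m:ℤ)) = [] := by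
      have h1 : ¬(-(m:ℤ) = 0) := by omega
      have h2 : ¬((0:ℤ) < -(m:ℤ)) := by omega
      have h3 : ¬((((c0 :: rest).length : ℕ) : ℤ) < 0) := by omega
      unfold PySem.List.pyRange
      rw [if_neg h1, if_neg h2, if_neg h3]
      simp
    have hBguard : (PySem.List.pyGet? (c0 :: rest) 0 = some '0' ∨ -(m:ℤ) < 1) := by
      right; omega
    rw [if_pos hBguard]
    simp only [hrep, PySem.List.pyGet?_zero_cons, hrange, List.all_nil, if_pos, hc0, if_false]
    simp
    omega
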